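-- pv_equiv track=rewrite | github.com/seon-2/coding_test_log | 프로그래머스/3/43238. 입국심사/입국심사.py | solution
-- ===== SOURCE A (Python) =====
-- def solution(n, times):
--     answer = 0
--
--     def find_min_time(low, high):
--         while low <= high:
--             mid = (high + low) // 2
--             total_people = sum(mid // time for time in times)
--
--             if total_people >= n: # 시간 늘리기
--                 high = mid - 1
--             else:
--                 low = mid + 1
--
--         return low
--
--     answer = find_min_time(1, max(times)*n)
--
--     return answer
-- ===== SOURCE B (Python) =====
-- def solution(n, times):
--     def people(x):
--         done = 0
--         for t in times:
--             done += x // t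
--         return done
--
--     def bisect(pred, lo, hi):
--         if lo > hi:
--             return lo
--         mid = (lo + hi) // 2
--         if pred(mid):
--             return bisect(pred, lo, mid - 1)
--         return bisect(pred, mid + 1, hi)
--
--     return bisect(lambda x: people(x) >= n, 1, max(times) * n)
-- ===== Notes on version B (the rewrite author's own statement) =====
-- stated objective: alternative
-- what changed: A's monolithic while-loop is decomposed into a generic recursive divide-and-conquer bisect taking an abstract predicate, with the people-count extracted into a separate accumulator-loop helper passed in as a lambda.
import Mathlib
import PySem

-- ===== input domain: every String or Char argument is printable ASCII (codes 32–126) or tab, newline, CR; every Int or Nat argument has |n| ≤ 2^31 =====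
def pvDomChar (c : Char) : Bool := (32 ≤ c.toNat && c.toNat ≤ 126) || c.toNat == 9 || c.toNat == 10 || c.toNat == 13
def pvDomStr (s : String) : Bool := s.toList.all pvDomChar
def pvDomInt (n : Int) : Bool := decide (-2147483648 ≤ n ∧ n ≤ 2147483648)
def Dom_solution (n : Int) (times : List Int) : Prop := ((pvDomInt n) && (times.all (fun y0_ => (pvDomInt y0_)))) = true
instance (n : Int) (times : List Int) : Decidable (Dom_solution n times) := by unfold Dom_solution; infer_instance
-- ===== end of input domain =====

-- B decomposes A's monolithic while-loop binary search into a generic recursive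
-- divide-and-conquer bisect over an abstract predicate, with the people count as a
-- separate accumulator-loop helper (objective: alternative).

-- ===== PORT A =====
-- A's inner `find_min_time`: while low <= high: mid = (high+low)//2; total = sum(mid//time …).
-- The Nat fuel only makes the loop total; each iteration shrinks the interval [low, high]
-- strictly, so (high+1-low).toNat + 1 steps always reach the loop's exit (low > high).
def findMinTime (n : Int) (times : List Int) : Nat → Int → Int → Int
  | 0, low, _ => low
  | fuel + 1, low, high =>
    if low ≤ high then
      let mid := PySem.Int.floordiv (high + low) 2
      let total := (times.map (fun time => PySem.Int.floordiv mid time)).sum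
      if n ≤ total then
        findMinTime n times fuel low (mid - 1)
      else
        findMinTime n times fuel (mid + 1) high
    else low

def solution (n : Int) (times : List Int) : Int :=
  match PySem.List.max? times (fun x => x) with
  | some m => findMinTime n times ((m * n + 1 - 1).toNat + 1) 1 (m * n)
  | none => 0  -- unreachable: max([]) raises ValueError, excluded by Pre_

-- ===== PORT B =====
-- B's `people(x)`: accumulator loop  done += x // t
def people (times : List Int) (x : Int) : Int :=
  times.foldl (fun done t => done + PySem.Int.floordiv x t) 0

-- B's generic `bisect(pred, lo, hi)`: recursive divide-and-conquer over halved intervals.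
-- The Nat fuel only makes the recursion total; the interval shrinks strictly each call.
def bisect (pred : Int → Bool) : Nat → Int → Int → Int
  | 0, lo, _ => lo
  | fuel + 1, lo, hi =>
    if lo > hi then lo
    else
      let mid := PySem.Int.floordiv (lo + hi) 2
      if pred mid then bisect pred fuel lo (mid - 1)
      else bisect pred fuel (mid + 1) hi

def solution_alt (n : Int) (times : List Int) : Int :=
  match PySem.List.max? times (fun x => x) with
  | some m => bisect (fun x => decide (people times x ≥ n)) ((m * n + 1 - 1).toNat + 1) 1 (m * n)
  | none => 0  -- unreachable: max([]) raises ValueError, excluded by Pre_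

-- ===== PRECONDITION & SPEC =====
-- Pre_ excludes exactly the inputs where A raises: empty times (ValueError from max), and
-- a 0 in times when the search interval is non-empty (ZeroDivisionError from mid // 0).
def Pre_solution (n : Int) (times : List Int) : Prop :=
  times ≠ [] ∧ ((0 : Int) ∈ times → ¬(1 ≤ n ∧ ∃ t ∈ times, (1 : Int) ≤ t))
instance (n : Int) (times : List Int) : Decidable (Pre_solution n times) := by
  unfold Pre_solution; infer_instance
def pvWitness_solution : Int × List Int := (6, [7, 10])

def Spec_solution (n : Int) (times : List Int) (out : Int) : Prop := out = solution_alt n times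
instance (n : Int) (times : List Int) (out : Int) : Decidable (Spec_solution n times out) := by unfold Spec_solution; infer_instance

-- ===== CLAIM (what is proved, stated in full; the proofs are below) =====
def Claim_equal_solution : Prop := ∀ (n : Int) (times : List Int), Dom_solution n times → Pre_solution n times → Spec_solution n times (solution n times)

-- ===== LEMMAS AND PROOFS =====

lemma find_eq_aux (n : Int) (times : List Int) :
    ∀ (fuel : Nat) (low high : Int),
      findMinTime n times fuel low high = bisect (fun x => decide (people times x ≥ n)) fuel low high := by
  intro fuel
  induction fuel with
  | zero => intro low high; rfl
  | succ k ih =>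
    intro low high
    show findMinTime n times (k + 1) low high = bisect _ (k + 1) low high
    rw [findMinTime, bisect]
    by_cases hle : low ≤ high
    · rw [if_pos hle, if_neg (by omega : ¬ low > high)]
      simp only []
      rw [Int.add_comm high low]
      set mid := PySem.Int.floordiv (low + high) 2 with hmid
      have hp : people times mid = (times.map (fun time => PySem.Int.floordiv mid time)).sum := by
        unfold people
        rw [PySem.List.foldl_add, zero_add]
      set S := (times.map (fun time => PySem.Int.floordiv mid time)).sum with hS
      by_cases hc : n ≤ S
      · rw [if_pos hc, if_pos (decide_eq_true (show people times mid ≥ n by rw [hp]; exact hc))]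
        exact ih low (mid - 1)
      · rw [if_neg hc, if_neg (by rw [decide_eq_true_eq, hp]; exact hc)]
        exact ih (mid + 1) high
    · rw [if_neg hle, if_pos (by omega : low > high)]

-- ===== VERDICT (by name: the statement is the Claim_ definition above) =====
theorem solution_spec : Claim_equal_solution := by
  intro n times _ _
  unfold Spec_solution solution solution_alt
  cases h : PySem.List.max? times (fun x => x) with
  | none => rfl
  | some m =>
    exact find_eq_aux n times ((m * n + 1 - 1).toNat + 1) 1 (m * n)
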